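-- pv_equiv track=rewrite | github.com/XAI-liacs/LLaMEA | llamea/utils.py | _find_with_fuzz
-- ===== SOURCE A (Python) =====
-- from typing import List, Tuple
--
-- def _leading_trailing_context_mask(
--     old_pairs: List[Tuple[str, bool]]
-- ) -> Tuple[int, int]:
--     """Return counts of leading and trailing context-only lines in old_pairs."""
--     lead = 0
--     for t, required in old_pairs:
--         if required:
--             break
--         lead += 1
--     trail = 0
--     for t, required in reversed(old_pairs):
--         if required:
--             break
--         trail += 1
--     return lead, trail
--
-- def _find_with_fuzz(
--     text_lines: List[str], old_seq: List[str], ctx_flags: List[bool], max_fuzz: int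
-- ) -> int:
--     """
--     Find the start index where old_seq occurs in text_lines.
--     ctx_flags[i] == False for context lines (originating from ' '), True for required lines (originating from '-').
--     Fuzz allows dropping up to max_fuzz context lines from the *start and/or end* when locating the block.
--     Returns the *start index for the full, non-dropped old_seq* slice if found, else -1.
--     """
--     n = len(old_seq)
--     if n == 0:
--         return 0
--
--     # exact match first
--     for i in range(0, len(text_lines) - n + 1):
--         if text_lines[i : i + n] == old_seq:
--             return i
--
--     # prepare to drop context lines at the edges only
--     lead_ctx, trail_ctx = _leading_trailing_context_mask(list(zip(old_seq, ctx_flags)))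
--     max_lead_drop = min(max_fuzz, lead_ctx)
--     max_trail_drop = min(max_fuzz, trail_ctx)
--
--     for d_lead in range(0, max_lead_drop + 1):
--         for d_trail in range(0, max_trail_drop + 1):
--             if d_lead == 0 and d_trail == 0:
--                 continue
--             sub = old_seq[d_lead : n - d_trail]
--             if not sub:
--                 continue
--             m = len(sub)
--             for i in range(0, len(text_lines) - m + 1):
--                 if text_lines[i : i + m] == sub:
--                     start = i - d_lead
--                     if start < 0:
--                         continue
--                     end = start + n
--                     if end > len(text_lines):
--                         continue
--                     # we accept mismatches only on the dropped context edges;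
--                     # the interior must match exactly
--                     if text_lines[start + d_lead : end - d_trail] == sub:
--                         return start
--     return -1
-- ===== SOURCE B (Python) =====
-- from typing import List
--
-- def _find_with_fuzz(
--     text_lines: List[str], old_seq: List[str], ctx_flags: List[bool], max_fuzz: int
-- ) -> int:
--     n = len(old_seq)
--     if n == 0:
--         return 0
--     L = len(text_lines)
--
--     # index: line content -> increasing list of positions in text_lines
--     pos = {}
--     for i, line in enumerate(text_lines):
--         pos.setdefault(line, []).append(i)
--
--     # leading/trailing context counts (over the zipped prefix, as the flags
--     # list may be shorter than old_seq)
--     k = min(n, len(ctx_flags))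
--     flags = ctx_flags[:k]
--     lead = next((j for j, f in enumerate(flags) if f), k)
--     trail = next((j for j, f in enumerate(reversed(flags)) if f), k)
--
--     # try drops in order, (0, 0) first (the exact match)
--     for d_lead in range(max(0, min(max_fuzz, lead)) + 1):
--         for d_trail in range(max(0, min(max_fuzz, trail)) + 1):
--             sub = old_seq[d_lead : n - d_trail]
--             if not sub:
--                 continue
--             m = len(sub)
--             for i in pos.get(sub[0], ()):
--                 if i < d_lead or i + m > L - d_trail:
--                     continue
--                 if text_lines[i : i + m] == sub:
--                     return i - d_lead
--     return -1
-- ===== Notes on version B (the rewrite author's own statement) =====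
-- stated objective: alternative
-- what changed: B builds one line->positions index of text_lines up front and, for each (d_lead,d_trail) drop pair taken in A's order with the exact match folded in as the (0,0) pair, scans only the candidate positions of the pattern's first line inside the valid window, replacing A's separate exact pass, per-pair full scans, and redundant interior re-check.
import Mathlib
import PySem

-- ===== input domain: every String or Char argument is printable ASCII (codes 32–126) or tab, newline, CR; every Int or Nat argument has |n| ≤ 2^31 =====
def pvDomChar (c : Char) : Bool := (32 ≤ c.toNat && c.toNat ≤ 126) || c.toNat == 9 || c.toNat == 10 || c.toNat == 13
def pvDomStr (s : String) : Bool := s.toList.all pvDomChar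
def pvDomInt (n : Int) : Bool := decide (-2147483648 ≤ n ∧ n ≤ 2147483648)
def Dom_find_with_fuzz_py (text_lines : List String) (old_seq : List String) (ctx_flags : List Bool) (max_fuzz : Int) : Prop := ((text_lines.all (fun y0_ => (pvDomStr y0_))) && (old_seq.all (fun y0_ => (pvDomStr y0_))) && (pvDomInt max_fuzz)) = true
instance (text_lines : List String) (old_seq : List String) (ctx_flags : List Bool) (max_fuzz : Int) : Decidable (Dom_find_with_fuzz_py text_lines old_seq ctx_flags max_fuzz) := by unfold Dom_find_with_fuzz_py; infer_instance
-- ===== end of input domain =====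

-- B replaces A's per-pattern full scans by one precomputed line→positions index,
-- folds the exact-match phase into the (0,0) drop pair, and skips the redundant
-- interior re-check; objective: alternative (same cost, different traversal).

-- ===== PORT A =====

-- for t, required in old_pairs: if required: break; lead += 1
def ltcLeadA : List (String × Bool) → Int
  | [] => 0
  | (_, required) :: rest => if required then 0 else 1 + ltcLeadA rest

-- exact-match loop: for i in range(0, len(text_lines)-n+1): if text_lines[i:i+n]==old_seq: return i
def exactLoopA (text old : List String) (n : Int) : List Int → Option Int
  | [] => none
  | i :: rest =>
    if PySem.List.slice text (some i) (some (i + n)) = old then some i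
    else exactLoopA text old n rest

-- the innermost i-loop of the fuzz search (with its continue branches)
def innerA (text sub : List String) (n m dl dt L : Int) : List Int → Option Int
  | [] => none
  | i :: rest =>
    if PySem.List.slice text (some i) (some (i + m)) = sub then
      let start := i - dl
      if start < 0 then innerA text sub n m dl dt L rest
      else
        let e := start + n
        if e > L then innerA text sub n m dl dt L rest
        else if PySem.List.slice text (some (start + dl)) (some (e - dt)) = sub then some start
        else innerA text sub n m dl dt L rest
    else innerA text sub n m dl dt L rest

def fuzzDtA (text old : List String) (n L dl : Int) : List Int → Option Int
  | [] => none
  | dt :: rest =>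
    if dl == 0 && dt == 0 then fuzzDtA text old n L dl rest
    else
      let sub := PySem.List.slice old (some dl) (some (n - dt))
      if sub = [] then fuzzDtA text old n L dl rest
      else
        let m : Int := (sub.length : Int)
        match innerA text sub n m dl dt L (PySem.List.pyRange 0 (L - m + 1) 1) with
        | some s => some s
        | none => fuzzDtA text old n L dl rest

def fuzzDlA (text old : List String) (n L maxTrail : Int) : List Int → Option Int
  | [] => none
  | dl :: rest =>
    match fuzzDtA text old n L dl (PySem.List.pyRange 0 (maxTrail + 1) 1) with
    | some s => some s
    | none => fuzzDlA text old n L maxTrail rest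

def find_with_fuzz_py (text_lines : List String) (old_seq : List String) (ctx_flags : List Bool) (max_fuzz : Int) : Int :=
  let n : Int := (old_seq.length : Int)
  if n = 0 then 0
  else
    let L : Int := (text_lines.length : Int)
    match exactLoopA text_lines old_seq n (PySem.List.pyRange 0 (L - n + 1) 1) with
    | some i => i
    | none =>
      let pairs := old_seq.zip ctx_flags
      let lead_ctx := ltcLeadA pairs
      let trail_ctx := ltcLeadA pairs.reverse
      let maxLead := min max_fuzz lead_ctx
      let maxTrail := min max_fuzz trail_ctx
      match fuzzDlA text_lines old_seq n L maxTrail (PySem.List.pyRange 0 (maxLead + 1) 1) with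
      | some s => s
      | none => -1

-- ===== PORT B =====

-- pos = {}; for i, line in enumerate(text_lines): pos.setdefault(line, []).append(i)
def buildPosB (text : List String) : PySem.Dict String (List Int) :=
  (PySem.List.enumerate text 0).foldl (fun d p => d.modify p.2 [] (· ++ [p.1])) PySem.Dict.empty

-- next((j for j, f in pairs if f), dflt)
def firstTrueB (dflt : Int) : List (Int × Bool) → Int
  | [] => dflt
  | (j, f) :: rest => if f then j else firstTrueB dflt rest

-- for i in pos.get(sub[0], ()): …
def innerB (text sub : List String) (m dl dt L : Int) : List Int → Option Int
  | [] => none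
  | i :: rest =>
    if i < dl || i + m > L - dt then innerB text sub m dl dt L rest
    else if PySem.List.slice text (some i) (some (i + m)) = sub then some (i - dl)
    else innerB text sub m dl dt L rest

def fuzzDtB (text old : List String) (pos : PySem.Dict String (List Int)) (n L dl : Int) : List Int → Option Int
  | [] => none
  | dt :: rest =>
    match PySem.List.slice old (some dl) (some (n - dt)) with
    | [] => fuzzDtB text old pos n L dl rest
    | s0 :: stail =>
      let sub := s0 :: stail
      let m : Int := (sub.length : Int)
      match innerB text sub m dl dt L (pos.getD s0 []) with
      | some v => some v
      | none => fuzzDtB text old pos n L dl rest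

def fuzzDlB (text old : List String) (pos : PySem.Dict String (List Int)) (n L maxTrail : Int) : List Int → Option Int
  | [] => none
  | dl :: rest =>
    match fuzzDtB text old pos n L dl (PySem.List.pyRange 0 (maxTrail + 1) 1) with
    | some v => some v
    | none => fuzzDlB text old pos n L maxTrail rest

def find_with_fuzz_py_alt (text_lines : List String) (old_seq : List String) (ctx_flags : List Bool) (max_fuzz : Int) : Int :=
  let n : Int := (old_seq.length : Int)
  if n = 0 then 0
  else
    let L : Int := (text_lines.length : Int)
    let pos := buildPosB text_lines
    let k : Int := min n (ctx_flags.length : Int)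
    let flags := PySem.List.slice ctx_flags none (some k)
    let lead := firstTrueB k (PySem.List.enumerate flags 0)
    let trail := firstTrueB k (PySem.List.enumerate flags.reverse 0)
    match fuzzDlB text_lines old_seq pos n L (max 0 (min max_fuzz trail))
        (PySem.List.pyRange 0 (max 0 (min max_fuzz lead) + 1) 1) with
    | some v => v
    | none => -1

-- ===== PRECONDITION & SPEC =====
def Spec_find_with_fuzz_py (text_lines : List String) (old_seq : List String) (ctx_flags : List Bool) (max_fuzz : Int) (out : Int) : Prop := out = find_with_fuzz_py_alt text_lines old_seq ctx_flags max_fuzz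
instance (text_lines : List String) (old_seq : List String) (ctx_flags : List Bool) (max_fuzz : Int) (out : Int) : Decidable (Spec_find_with_fuzz_py text_lines old_seq ctx_flags max_fuzz out) := by unfold Spec_find_with_fuzz_py; infer_instance

-- ===== CLAIM (what is proved, stated in full; the proofs are below) =====
def Claim_equal_find_with_fuzz_py : Prop := ∀ (text_lines : List String) (old_seq : List String) (ctx_flags : List Bool) (max_fuzz : Int), Dom_find_with_fuzz_py text_lines old_seq ctx_flags max_fuzz → Spec_find_with_fuzz_py text_lines old_seq ctx_flags max_fuzz (find_with_fuzz_py text_lines old_seq ctx_flags max_fuzz)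

-- ===== LEMMAS AND PROOFS =====

-- first-hit predicate shared by both inner loops, and the canonical per-(d_lead,d_trail) result
def predC (text sub : List String) (m dl dt L : Int) (i : Int) : Bool :=
  decide (dl ≤ i) && decide (i + m ≤ L - dt) && decide (PySem.List.slice text (some i) (some (i + m)) = sub)

def GP (text old : List String) (n L dl dt : Int) : Option Int :=
  let sub := PySem.List.slice old (some dl) (some (n - dt))
  if sub = [] then none
  else ((PySem.List.enumerate text 0).find? (fun p => predC text sub (sub.length : Int) dl dt L p.1)).map (fun p => p.1 - dl)

def chainO (g : Int → Option Int) : List Int → Option Int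
  | [] => none
  | x :: r => (g x).or (chainO g r)

theorem chainO_congr (g g' : Int → Option Int) (l : List Int) (h : ∀ x ∈ l, g x = g' x) :
    chainO g l = chainO g' l := by
  induction l with
  | nil => rfl
  | cons a t ih =>
    simp only [chainO, h a (List.mem_cons_self), ih (fun x hx => h x (List.mem_cons_of_mem a hx))]

theorem find?_congr_mem {α : Type} (l : List α) (p q : α → Bool) (h : ∀ x ∈ l, p x = q x) :
    l.find? p = l.find? q := by
  induction l with
  | nil => rfl
  | cons a t ih =>
    have ha := h a (List.mem_cons_self)
    simp only [List.find?_cons, ha]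
    cases q a with
    | true => rfl
    | false => exact ih (fun x hx => h x (List.mem_cons_of_mem a hx))

theorem find?_filter_and {α : Type} (l : List α) (p q : α → Bool) :
    (l.filter p).find? q = l.find? (fun a => p a && q a) := by
  induction l with
  | nil => rfl
  | cons a t ih =>
    by_cases hp : p a = true
    · simp [List.filter_cons, hp, List.find?_cons, ih]
    · simp only [Bool.not_eq_true] at hp
      simp [List.filter_cons, hp, List.find?_cons, ih]

theorem head?_take_pos {α : Type} (l : List α) (n : Nat) (h : 1 ≤ n) :
    (l.take n).head? = l.head? := by
  cases l with
  | nil => simp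
  | cons a t => cases n with
    | zero => omega
    | succ k => simp

theorem slice_head_eq (text : List String) (i m : Int) (s0 : String) (st : List String)
    (h0 : 0 ≤ i) (h1 : 0 ≤ i + m)
    (hm : PySem.List.slice text (some i) (some (i + m)) = s0 :: st) :
    text[i.toNat]? = some s0 := by
  rw [PySem.List.slice_toNat _ h0 h1] at hm
  have hh := congrArg List.head? hm
  rw [head?_take_pos] at hh
  · rwa [List.head?_drop] at hh
  · by_contra hc
    have : (i + m).toNat - i.toNat = 0 := by omega
    rw [this] at hm
    simp at hm

theorem mem_enumerate_getElem {α : Type} (xs : List α) (s : Int) (p : Int × α)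
    (h : p ∈ PySem.List.enumerate xs s) :
    s ≤ p.1 ∧ p.1 < s + xs.length ∧ xs[(p.1 - s).toNat]? = some p.2 := by
  induction xs generalizing s with
  | nil => simp [PySem.List.enumerate_nil] at h
  | cons a t ih =>
    rw [PySem.List.enumerate_cons] at h
    rcases List.mem_cons.mp h with h1 | h2
    · subst h1
      refine ⟨le_refl _, by simp, ?_⟩
      simp
    · obtain ⟨ha, hb, hc⟩ := ih (s + 1) h2
      refine ⟨by omega, by simp; omega, ?_⟩
      have hn : (p.1 - s).toNat = (p.1 - (s + 1)).toNat + 1 := by omega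
      rw [hn, List.getElem?_cons_succ]
      exact hc

theorem innerA_eq (text sub : List String) (n dl dt L : Int)
    (hm : ((sub.length : Int)) = n - dl - dt) (ris : List Int) :
    innerA text sub n (sub.length : Int) dl dt L ris
      = (ris.find? (predC text sub (sub.length : Int) dl dt L)).map (fun i => i - dl) := by
  induction ris with
  | nil => rfl
  | cons i r ih =>
    simp only [innerA, List.find?_cons]
    by_cases hsl : PySem.List.slice text (some i) (some (i + (sub.length : Int))) = sub
    · by_cases hlt : i - dl < 0
      · have : predC text sub (sub.length : Int) dl dt L i = false := by
          simp [predC]; intro h; omega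
        rw [if_pos hsl, if_pos hlt, this, ih]
      · by_cases hgt : i - dl + n > L
        · have : predC text sub (sub.length : Int) dl dt L i = false := by
            simp [predC]; intro h hb; omega
          rw [if_pos hsl, if_neg hlt, if_pos hgt, this, ih]
        · have hpr : predC text sub (sub.length : Int) dl dt L i = true := by
            simp only [predC, Bool.and_eq_true, decide_eq_true_eq]
            exact ⟨⟨by omega, by omega⟩, hsl⟩
          have hint : PySem.List.slice text (some (i - dl + dl)) (some (i - dl + n - dt)) = sub := by
            rw [show i - dl + dl = i from by ring, show i - dl + n - dt = i + (sub.length : Int) from by omega]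
            exact hsl
          rw [if_pos hsl, if_neg hlt, if_neg hgt, if_pos hint, hpr]
          rfl
    · have : predC text sub (sub.length : Int) dl dt L i = false := by
        simp [predC]; intro _ _; exact hsl
      rw [if_neg hsl, this, ih]

theorem innerB_eq (text sub : List String) (m dl dt L : Int) (l : List Int) :
    innerB text sub m dl dt L l
      = (l.find? (predC text sub m dl dt L)).map (fun i => i - dl) := by
  induction l with
  | nil => rfl
  | cons i r ih =>
    simp only [innerB, List.find?_cons]
    by_cases hc : (decide (i < dl) || decide (i + m > L - dt)) = true
    · have hor : i < dl ∨ i + m > L - dt := by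
        rcases Bool.or_eq_true_iff.mp hc with h | h
        · exact Or.inl (of_decide_eq_true h)
        · exact Or.inr (of_decide_eq_true h)
      have : predC text sub m dl dt L i = false := by
        simp [predC]; intro h hb; omega
      rw [if_pos hc, this, ih]
    · have hor : ¬ (i < dl) ∧ ¬ (i + m > L - dt) := by
        constructor <;> intro h <;> exact hc (by simp [h])
      by_cases hsl : PySem.List.slice text (some i) (some (i + m)) = sub
      · have : predC text sub m dl dt L i = true := by
          simp only [predC, Bool.and_eq_true, decide_eq_true_eq]
          exact ⟨⟨by omega, by omega⟩, hsl⟩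
        rw [if_neg hc, if_pos hsl, this]
        rfl
      · have : predC text sub m dl dt L i = false := by
          simp [predC]; intro _ _; exact hsl
        rw [if_neg hc, if_neg hsl, this, ih]

theorem exactLoopA_eq (text old : List String) (n : Int) (l : List Int) :
    exactLoopA text old n l
      = l.find? (fun i => decide (PySem.List.slice text (some i) (some (i + n)) = old)) := by
  induction l with
  | nil => rfl
  | cons i r ih =>
    simp only [exactLoopA, List.find?_cons]
    by_cases hsl : PySem.List.slice text (some i) (some (i + n)) = old
    · simp [hsl]
    · simp [hsl, ih]


theorem slice_length_int (old : List String) (n dl dt : Int)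
    (hn : n = (old.length : Int)) (hdl : 0 ≤ dl) (hdt : 0 ≤ dt) (hdtn : dt ≤ n)
    (hne : PySem.List.slice old (some dl) (some (n - dt)) ≠ []) :
    ((PySem.List.slice old (some dl) (some (n - dt))).length : Int) = n - dl - dt := by
  rw [PySem.List.slice_toNat _ hdl (by omega)] at hne ⊢
  have h2 : 0 < (List.take ((n - dt).toNat - dl.toNat) (List.drop dl.toNat old)).length := by
    cases h : List.take ((n - dt).toNat - dl.toNat) (List.drop dl.toNat old) with
    | nil => exact absurd h hne
    | cons a t => simp
  simp only [List.length_take, List.length_drop] at h2 ⊢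
  omega

theorem find?_range_ext (text sub : List String) (m dl dt L : Int)
    (hm1 : 1 ≤ m) (hdt : 0 ≤ dt) :
    (PySem.List.pyRange 0 (L - m + 1) 1).find? (predC text sub m dl dt L)
      = (PySem.List.pyRange 0 L 1).find? (predC text sub m dl dt L) := by
  rcases (by omega : L - m + 1 ≤ 0 ∨ 0 < L - m + 1) with hle | hgt
  · rw [PySem.List.pyRange_one_eq_nil hle]
    simp only [List.find?_nil]
    symm
    rw [List.find?_eq_none]
    intro x hx hp
    have hx' := PySem.List.mem_pyRange_one.mp hx
    simp only [predC, Bool.and_eq_true, decide_eq_true_eq] at hp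
    omega
  · rw [PySem.List.pyRange_one_append 0 (L - m + 1) L (by omega) (by omega), List.find?_append]
    have hnone : (PySem.List.pyRange (L - m + 1) L 1).find? (predC text sub m dl dt L) = none := by
      rw [List.find?_eq_none]
      intro x hx hp
      have hx' := PySem.List.mem_pyRange_one.mp hx
      simp only [predC, Bool.and_eq_true, decide_eq_true_eq] at hp
      omega
    rw [hnone, Option.or_none]

theorem find?_pyRange_enum (text : List String) (q : Int → Bool) :
    (PySem.List.pyRange 0 (text.length : Int) 1).find? q
      = ((PySem.List.enumerate text 0).find? (fun p => q p.1)).map (fun p => p.1) := by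
  have h := PySem.List.map_fst_enumerate text 0
  rw [zero_add] at h
  rw [← h, List.find?_map]
  rfl

theorem cand_eq (text : List String) (s0 : String) :
    (buildPosB text).getD s0 []
      = ((PySem.List.enumerate text 0).filter (fun p => p.2 == s0)).map (fun p => p.1) := by
  unfold buildPosB
  have hfold : (PySem.List.enumerate text 0).foldl (fun d p => d.modify p.2 [] (· ++ [p.1])) PySem.Dict.empty
      = ((PySem.List.enumerate text 0).map Prod.swap).foldl (fun d p => d.modify p.1 [] (· ++ [p.2])) PySem.Dict.empty := by
    rw [List.foldl_map]
    rfl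
  rw [hfold, PySem.Dict.getD_foldl_modify_append, PySem.Dict.getD_empty, List.nil_append,
    List.filter_map, List.map_map]
  rfl

theorem fuzzDtA_eq (text old : List String) (dl : Int) (hdl : 0 ≤ dl)
    (dts : List Int) (hdts : ∀ dt ∈ dts, 0 ≤ dt ∧ dt ≤ (old.length : Int)) :
    fuzzDtA text old (old.length : Int) (text.length : Int) dl dts
      = chainO (fun dt => if dl = 0 ∧ dt = 0 then none
          else GP text old (old.length : Int) (text.length : Int) dl dt) dts := by
  induction dts with
  | nil => rfl
  | cons dt rest ih =>
    have hd := hdts dt List.mem_cons_self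
    have ihr := ih (fun x hx => hdts x (List.mem_cons_of_mem dt hx))
    simp only [fuzzDtA, chainO]
    by_cases hsk : dl = 0 ∧ dt = 0
    · have hb : (dl == 0 && dt == 0) = true := by simp [hsk.1, hsk.2]
      rw [if_pos hb, if_pos hsk, ihr, Option.none_or]
    · have hb : ¬ ((dl == 0 && dt == 0) = true) := by
        simp only [Bool.and_eq_true, beq_iff_eq]
        exact hsk
      rw [if_neg hb, if_neg hsk]
      by_cases hsub : PySem.List.slice old (some dl) (some ((old.length : Int) - dt)) = []
      · rw [if_pos hsub, ihr]
        have hg : GP text old (old.length : Int) (text.length : Int) dl dt = none := by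
          simp only [GP]
          rw [if_pos hsub]
        rw [hg, Option.none_or]
      · rw [if_neg hsub]
        have hlen := slice_length_int old (old.length : Int) dl dt rfl hdl hd.1 hd.2 hsub
        have hm1 : 1 ≤ ((PySem.List.slice old (some dl) (some ((old.length : Int) - dt))).length : Int) := by
          have h2 : 0 < (PySem.List.slice old (some dl) (some ((old.length : Int) - dt))).length := by
            cases h : PySem.List.slice old (some dl) (some ((old.length : Int) - dt)) with
            | nil => exact absurd h hsub
            | cons a t => simp
          omega
        rw [innerA_eq text _ _ dl dt _ hlen, find?_range_ext text _ _ dl dt _ hm1 hd.1,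
          find?_pyRange_enum]
        have hg : GP text old (old.length : Int) (text.length : Int) dl dt
            = ((PySem.List.enumerate text 0).find?
                (fun p => predC text (PySem.List.slice old (some dl) (some ((old.length : Int) - dt)))
                  ((PySem.List.slice old (some dl) (some ((old.length : Int) - dt))).length : Int)
                  dl dt (text.length : Int) p.1)).map (fun p => p.1 - dl) := by
          simp only [GP]
          rw [if_neg hsub]
        rw [hg, ihr]
        cases hx : (PySem.List.enumerate text 0).find?
            (fun p => predC text (PySem.List.slice old (some dl) (some ((old.length : Int) - dt)))
              ((PySem.List.slice old (some dl) (some ((old.length : Int) - dt))).length : Int)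
              dl dt (text.length : Int) p.1) with
        | none => simp [hx]
        | some p => simp [hx]

theorem find?_filter_map_fst (E : List (Int × String)) (f : Int × String → Bool) (q : Int → Bool) :
    ((E.filter f).map (fun p => p.1)).find? q
      = (E.find? (fun p => f p && q p.1)).map (fun p => p.1) := by
  rw [List.find?_map, find?_filter_and]
  rfl

theorem fuzzDtB_eq (text old : List String) (dl : Int) (hdl : 0 ≤ dl)
    (dts : List Int) (hdts : ∀ dt ∈ dts, 0 ≤ dt ∧ dt ≤ (old.length : Int)) :
    fuzzDtB text old (buildPosB text) (old.length : Int) (text.length : Int) dl dts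
      = chainO (GP text old (old.length : Int) (text.length : Int) dl) dts := by
  induction dts with
  | nil => rfl
  | cons dt rest ih =>
    have ihr := ih (fun x hx => hdts x (List.mem_cons_of_mem dt hx))
    simp only [fuzzDtB, chainO]
    cases hsub : PySem.List.slice old (some dl) (some ((old.length : Int) - dt)) with
    | nil =>
      have hg : GP text old (old.length : Int) (text.length : Int) dl dt = none := by
        simp only [GP]
        rw [if_pos hsub]
      rw [hg, Option.none_or, ← ihr]
    | cons s0 stail =>
      have hg : GP text old (old.length : Int) (text.length : Int) dl dt
          = ((PySem.List.enumerate text 0).find?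
              (fun p => predC text (s0 :: stail) (((s0 :: stail).length : Int)) dl dt
                (text.length : Int) p.1)).map (fun p => p.1 - dl) := by
        simp only [GP]
        rw [hsub, if_neg (by simp)]
      have hcong : (PySem.List.enumerate text 0).find?
            (fun p => (p.2 == s0) && predC text (s0 :: stail) (((s0 :: stail).length : Int)) dl dt
              (text.length : Int) p.1)
          = (PySem.List.enumerate text 0).find?
            (fun p => predC text (s0 :: stail) (((s0 :: stail).length : Int)) dl dt
              (text.length : Int) p.1) := by
        apply find?_congr_mem
        intro p hp
        cases hpc : predC text (s0 :: stail) (((s0 :: stail).length : Int)) dl dt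
            (text.length : Int) p.1 with
        | false => simp [hpc]
        | true =>
          obtain ⟨hs, hlt, hget⟩ := mem_enumerate_getElem text 0 p hp
          have hpc' := hpc
          simp only [predC, Bool.and_eq_true, decide_eq_true_eq] at hpc'
          obtain ⟨⟨h1, h2⟩, h3⟩ := hpc'
          have h0i : (0 : Int) ≤ p.1 := le_trans hdl h1
          have hmn : (0 : Int) ≤ p.1 + ((s0 :: stail).length : Int) := by
            have := Int.natCast_nonneg (s0 :: stail).length
            omega
          have hhead := slice_head_eq text p.1 _ s0 stail h0i hmn h3
          rw [sub_zero] at hget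
          rw [hget] at hhead
          have hps : p.2 = s0 := by injection hhead
          simp [hpc, hps]
      dsimp only
      rw [cand_eq, innerB_eq, find?_filter_map_fst, hcong, hg, ihr]
      cases hx : (PySem.List.enumerate text 0).find?
          (fun p => predC text (s0 :: stail) (((s0 :: stail).length : Int)) dl dt
            (text.length : Int) p.1) with
      | none => simp [hx]
      | some p => simp [hx]

theorem fuzzDlA_eq (text old : List String) (maxTrail : Int) (hTn : maxTrail ≤ (old.length : Int))
    (dls : List Int) (hdls : ∀ dl ∈ dls, 0 ≤ dl) :
    fuzzDlA text old (old.length : Int) (text.length : Int) maxTrail dls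
      = chainO (fun dl => chainO (fun dt => if dl = 0 ∧ dt = 0 then none
          else GP text old (old.length : Int) (text.length : Int) dl dt)
          (PySem.List.pyRange 0 (maxTrail + 1) 1)) dls := by
  induction dls with
  | nil => rfl
  | cons dl rest ih =>
    have ihr := ih (fun x hx => hdls x (List.mem_cons_of_mem dl hx))
    simp only [fuzzDlA, chainO]
    rw [fuzzDtA_eq text old dl (hdls dl List.mem_cons_self) _
      (fun dt hdt => by
        have := PySem.List.mem_pyRange_one.mp hdt
        omega)]
    rw [ihr]
    cases hx : chainO (fun dt => if dl = 0 ∧ dt = 0 then none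
        else GP text old (old.length : Int) (text.length : Int) dl dt)
        (PySem.List.pyRange 0 (maxTrail + 1) 1) with
    | none => simp [hx]
    | some s => simp [hx]

theorem fuzzDlB_eq (text old : List String) (maxTrail : Int) (hTn : maxTrail ≤ (old.length : Int))
    (dls : List Int) (hdls : ∀ dl ∈ dls, 0 ≤ dl) :
    fuzzDlB text old (buildPosB text) (old.length : Int) (text.length : Int) maxTrail dls
      = chainO (fun dl => chainO (GP text old (old.length : Int) (text.length : Int) dl)
          (PySem.List.pyRange 0 (maxTrail + 1) 1)) dls := by
  induction dls with
  | nil => rfl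
  | cons dl rest ih =>
    have ihr := ih (fun x hx => hdls x (List.mem_cons_of_mem dl hx))
    simp only [fuzzDlB, chainO]
    rw [fuzzDtB_eq text old dl (hdls dl List.mem_cons_self) _
      (fun dt hdt => by
        have := PySem.List.mem_pyRange_one.mp hdt
        omega)]
    rw [ihr]
    cases hx : chainO (GP text old (old.length : Int) (text.length : Int) dl)
        (PySem.List.pyRange 0 (maxTrail + 1) 1) with
    | none => simp [hx]
    | some s => simp [hx]

theorem exact_eq_GP (text old : List String) (hpos : 1 ≤ (old.length : Int)) :
    exactLoopA text old (old.length : Int)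
        (PySem.List.pyRange 0 ((text.length : Int) - (old.length : Int) + 1) 1)
      = GP text old (old.length : Int) (text.length : Int) 0 0 := by
  have hsub : PySem.List.slice old (some 0) (some ((old.length : Int) - 0)) = old := by
    rw [sub_zero, PySem.List.slice_toNat _ le_rfl (by omega)]
    simp
  have hne : old ≠ [] := by
    intro h
    rw [h] at hpos
    simp at hpos
  rw [exactLoopA_eq]
  have hcong : (PySem.List.pyRange 0 ((text.length : Int) - (old.length : Int) + 1) 1).find?
        (fun i => decide (PySem.List.slice text (some i) (some (i + (old.length : Int))) = old))
      = (PySem.List.pyRange 0 ((text.length : Int) - (old.length : Int) + 1) 1).find?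
        (predC text old (old.length : Int) 0 0 (text.length : Int)) := by
    apply find?_congr_mem
    intro i hi
    have hi' := PySem.List.mem_pyRange_one.mp hi
    have h1 : (0 : Int) ≤ i := hi'.1
    simp [predC, h1]
    intro _
    omega
  rw [hcong, find?_range_ext text old _ 0 0 _ (by omega) le_rfl, find?_pyRange_enum]
  have hg : GP text old (old.length : Int) (text.length : Int) 0 0
      = ((PySem.List.enumerate text 0).find?
          (fun p => predC text old (old.length : Int) 0 0 (text.length : Int) p.1)).map
          (fun p => p.1 - 0) := by
    simp only [GP]
    rw [hsub, if_neg hne]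
  rw [hg]
  cases hx : (PySem.List.enumerate text 0).find?
      (fun p => predC text old (old.length : Int) 0 0 (text.length : Int) p.1) with
  | none => simp [hx]
  | some p => simp [hx]

-- leading-False count, linking A's break-loop over pairs with B's first-True search
def countFalseL : List Bool → Int
  | [] => 0
  | b :: r => if b then 0 else 1 + countFalseL r

theorem countFalseL_nonneg (l : List Bool) : 0 ≤ countFalseL l := by
  induction l with
  | nil => simp [countFalseL]
  | cons b r ih =>
    simp only [countFalseL]
    split <;> omega

theorem countFalseL_le_length (l : List Bool) : countFalseL l ≤ (l.length : Int) := by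
  induction l with
  | nil => simp [countFalseL]
  | cons b r ih =>
    simp only [countFalseL, List.length_cons]
    split <;> [omega; (push_cast; omega)]

theorem countFalseL_all_false (l : List Bool) (h : l.all (fun f => !f) = true) :
    countFalseL l = (l.length : Int) := by
  induction l with
  | nil => simp [countFalseL]
  | cons b r ih =>
    simp only [List.all_cons, Bool.and_eq_true] at h
    have hb : b = false := by
      cases b
      · rfl
      · simp at h
    subst hb
    rw [show countFalseL (false :: r) = 1 + countFalseL r from rfl, ih h.2]
    simp only [List.length_cons]
    push_cast
    omega

theorem ltcLeadA_eq_countFalse (ps : List (String × Bool)) :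
    ltcLeadA ps = countFalseL (ps.map (fun p => p.2)) := by
  induction ps with
  | nil => rfl
  | cons a r ih =>
    obtain ⟨t, b⟩ := a
    simp only [ltcLeadA, List.map_cons, countFalseL, ih]

theorem firstTrueB_enum (fl : List Bool) (s d : Int) :
    firstTrueB d (PySem.List.enumerate fl s)
      = if fl.all (fun f => !f) = true then d else s + countFalseL fl := by
  induction fl generalizing s with
  | nil => simp [PySem.List.enumerate_nil, firstTrueB]
  | cons b t ih =>
    rw [PySem.List.enumerate_cons]
    cases b with
    | true => simp [firstTrueB, countFalseL]
    | false =>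
      simp only [firstTrueB, if_neg Bool.false_ne_true, ih (s + 1), List.all_cons,
        Bool.not_false, Bool.true_and, countFalseL]
      split <;> ring

theorem firstTrueB_eq_countFalse (fl : List Bool) :
    firstTrueB (fl.length : Int) (PySem.List.enumerate fl 0) = countFalseL fl := by
  rw [firstTrueB_enum]
  split
  · rw [countFalseL_all_false fl (by assumption)]
  · rw [zero_add]

theorem firstTrueB_eq_countFalse_rev (fl : List Bool) :
    firstTrueB (fl.length : Int) (PySem.List.enumerate fl.reverse 0) = countFalseL fl.reverse := by
  rw [show ((fl.length : Int)) = ((fl.reverse.length : Int)) from by simp]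
  exact firstTrueB_eq_countFalse fl.reverse

theorem zip_map_snd {α β : Type} (l1 : List α) (l2 : List β) :
    (l1.zip l2).map (fun p => p.2) = l2.take l1.length := by
  induction l1 generalizing l2 with
  | nil => simp
  | cons a t ih =>
    cases l2 with
    | nil => simp
    | cons b r => simp [ih]

theorem take_min_length {α : Type} (l : List α) (a : Nat) :
    l.take (min a l.length) = l.take a := by
  rcases (by omega : a ≤ l.length ∨ l.length < a) with h | h
  · rw [min_eq_left h]
  · rw [min_eq_right (by omega), List.take_of_length_le le_rfl, List.take_of_length_le (by omega)]

theorem assemble (g gs : Int → Int → Option Int)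
    (hgs : ∀ dl dt, gs dl dt = if dl = 0 ∧ dt = 0 then none else g dl dt)
    (mLd mTd : Int) (hiff : mLd < 0 ↔ mTd < 0) :
    (match g 0 0 with
     | some i => i
     | none =>
        match chainO (fun dl => chainO (fun dt => gs dl dt) (PySem.List.pyRange 0 (mTd + 1) 1))
            (PySem.List.pyRange 0 (mLd + 1) 1) with
        | some s => s
        | none => -1)
    = (match chainO (fun dl => chainO (fun dt => g dl dt) (PySem.List.pyRange 0 (max 0 mTd + 1) 1))
          (PySem.List.pyRange 0 (max 0 mLd + 1) 1) with
       | some v => v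
       | none => -1) := by
  have hunf : ∀ (F : Int → Option Int) (x : Int) (r : List Int),
      chainO F (x :: r) = (F x).or (chainO F r) := fun _ _ _ => rfl
  rcases (by omega : mLd < 0 ∨ 0 ≤ mLd) with h | h
  · have hT := hiff.mp h
    rw [PySem.List.pyRange_one_eq_nil (show mLd + 1 ≤ 0 by omega),
      show max 0 mLd = 0 from by omega, show max 0 mTd = 0 from by omega,
      PySem.List.pyRange_one_singleton]
    cases h00 : g 0 0 <;> simp [chainO, h00]
  · have hT : 0 ≤ mTd := by omega
    rw [show max 0 mLd = mLd from by omega, show max 0 mTd = mTd from by omega,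
      PySem.List.pyRange_one_cons (show (0:Int) < mLd + 1 by omega),
      PySem.List.pyRange_one_cons (show (0:Int) < mTd + 1 by omega)]
    simp only [hunf]
    simp only [zero_add]
    have hgs0 : gs 0 0 = none := by
      rw [hgs]
      simp
    have hdt' : chainO (fun dt => gs 0 dt) (PySem.List.pyRange 1 (mTd + 1) 1)
        = chainO (fun dt => g 0 dt) (PySem.List.pyRange 1 (mTd + 1) 1) := by
      apply chainO_congr
      intro x hx
      have := PySem.List.mem_pyRange_one.mp hx
      show gs 0 x = g 0 x
      rw [hgs, if_neg (by intro hc; omega)]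
    have hdl' : chainO (fun dl => (gs dl 0).or (chainO (fun dt => gs dl dt)
          (PySem.List.pyRange 1 (mTd + 1) 1))) (PySem.List.pyRange 1 (mLd + 1) 1)
        = chainO (fun dl => (g dl 0).or (chainO (fun dt => g dl dt)
          (PySem.List.pyRange 1 (mTd + 1) 1))) (PySem.List.pyRange 1 (mLd + 1) 1) := by
      apply chainO_congr
      intro dl hdl
      have h1 := PySem.List.mem_pyRange_one.mp hdl
      rw [hgs, if_neg (by intro hc; omega),
        chainO_congr (fun dt => gs dl dt) (fun dt => g dl dt) _
          (fun x _ => by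
            show gs dl x = g dl x
            rw [hgs, if_neg (by intro hc; omega)])]
    rw [hgs0, Option.none_or, hdt', hdl']
    cases h00 : g 0 0 <;>
      cases hrest : (chainO (fun dt => g 0 dt) (PySem.List.pyRange 1 (mTd + 1) 1)).or
          (chainO (fun dl => (g dl 0).or (chainO (fun dt => g dl dt)
            (PySem.List.pyRange 1 (mTd + 1) 1))) (PySem.List.pyRange 1 (mLd + 1) 1)) <;>
        simp [h00, hrest, Option.or_assoc]

theorem main_eq (text old : List String) (ctx : List Bool) (mf : Int)
    (hpos : 1 ≤ (old.length : Int)) :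
    find_with_fuzz_py text old ctx mf = find_with_fuzz_py_alt text old ctx mf := by
  have hn0 : ¬ ((old.length : Int) = 0) := by omega
  unfold find_with_fuzz_py find_with_fuzz_py_alt
  simp only [if_neg hn0]
  rw [exact_eq_GP text old hpos]
  have hkn : (min (old.length : Int) (ctx.length : Int))
      = ((ctx.take (min old.length ctx.length)).length : Int) := by
    simp only [List.length_take]
    omega
  have hslice : PySem.List.slice ctx none (some (min (old.length : Int) (ctx.length : Int)))
      = ctx.take (min old.length ctx.length) := by
    rw [PySem.List.slice_to _ (by omega)]
    congr 1
    omega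
  have hA1 : ltcLeadA (old.zip ctx) = countFalseL (ctx.take (min old.length ctx.length)) := by
    rw [ltcLeadA_eq_countFalse, zip_map_snd, ← take_min_length ctx old.length]
  have hA2 : ltcLeadA (old.zip ctx).reverse
      = countFalseL ((ctx.take (min old.length ctx.length)).reverse) := by
    rw [ltcLeadA_eq_countFalse, List.map_reverse, zip_map_snd, ← take_min_length ctx old.length]
  rw [hA1, hA2, hslice, hkn, firstTrueB_eq_countFalse, firstTrueB_eq_countFalse_rev]
  have hc1 := countFalseL_nonneg (ctx.take (min old.length ctx.length))
  have hc2 := countFalseL_nonneg ((ctx.take (min old.length ctx.length)).reverse)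
  have hl2 := countFalseL_le_length ((ctx.take (min old.length ctx.length)).reverse)
  have hlen2 : (((ctx.take (min old.length ctx.length)).reverse.length : Int)) ≤ (old.length : Int) := by
    simp only [List.length_reverse, List.length_take]
    omega
  rw [fuzzDlA_eq text old (min mf (countFalseL ((ctx.take (min old.length ctx.length)).reverse)))
      (by omega) _ (fun dl h => (PySem.List.mem_pyRange_one.mp h).1)]
  rw [fuzzDlB_eq text old (max 0 (min mf (countFalseL ((ctx.take (min old.length ctx.length)).reverse))))
      (by omega) _ (fun dl h => (PySem.List.mem_pyRange_one.mp h).1)]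
  exact assemble (GP text old (old.length : Int) (text.length : Int))
    (fun dl dt => if dl = 0 ∧ dt = 0 then none
      else GP text old (old.length : Int) (text.length : Int) dl dt)
    (fun _ _ => rfl)
    (min mf (countFalseL (ctx.take (min old.length ctx.length))))
    (min mf (countFalseL ((ctx.take (min old.length ctx.length)).reverse)))
    (by omega)

-- ===== VERDICT (by name: the statement is the Claim_ definition above) =====
theorem find_with_fuzz_py_spec : Claim_equal_find_with_fuzz_py := by
  intro text_lines old_seq ctx_flags max_fuzz _
  unfold Spec_find_with_fuzz_py
  by_cases hn0 : (old_seq.length : Int) = 0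
  · unfold find_with_fuzz_py find_with_fuzz_py_alt
    simp [hn0]
  · exact main_eq text_lines old_seq ctx_flags max_fuzz (by omega)
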